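-- pv_equiv track=rewrite | github.com/ben-ce/thinkpython | exercises/chapter9/exercise_9-9.py | check_ages
-- ===== SOURCE A (Python) =====
-- def check_ages(age_gap=None):
--     i = 0
--     diff_count = {}
--     ages = []
--     while i < 100:
--         age_orig = str(i).zfill(2)
--         age_reverse = age_orig[::-1]
--         if age_orig != age_reverse and age_orig > age_reverse:
--             j = int(age_reverse)
--             diff = i - j
--             if age_gap:
--                 if diff == age_gap:
--                     ages.append(age_reverse)
--             else:
--                 if diff not in diff_count:
--                     diff_count[diff] = 1
--                 else:
--                     diff_count[diff] += 1
--         i += 1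
--     return diff_count, ages
-- ===== SOURCE B (Python) =====
-- def check_ages(age_gap=None):
--     # closed form: two-digit "ab" with a>b reverses to difference 9*(a-b)
--     if age_gap:
--         ages = []
--         if age_gap % 9 == 0 and 9 <= age_gap <= 81:
--             m = age_gap // 9
--             ages = [str(b) + str(b + m) for b in range(10 - m)]
--         return {}, ages
--     return {9 * m: 10 - m for m in range(1, 10)}, []
-- ===== Notes on version B (the rewrite author's own statement) =====
-- stated objective: simpler
-- what changed: Replaces the 100-iteration zfill/string-reversal scan with the closed form for two-digit reversal differences (digits a>b give 9*(a-b)): the counts dict is built directly as {9m: 10-m} and the matching-ages list directly as str(b)+str(b+m).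
import Mathlib
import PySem

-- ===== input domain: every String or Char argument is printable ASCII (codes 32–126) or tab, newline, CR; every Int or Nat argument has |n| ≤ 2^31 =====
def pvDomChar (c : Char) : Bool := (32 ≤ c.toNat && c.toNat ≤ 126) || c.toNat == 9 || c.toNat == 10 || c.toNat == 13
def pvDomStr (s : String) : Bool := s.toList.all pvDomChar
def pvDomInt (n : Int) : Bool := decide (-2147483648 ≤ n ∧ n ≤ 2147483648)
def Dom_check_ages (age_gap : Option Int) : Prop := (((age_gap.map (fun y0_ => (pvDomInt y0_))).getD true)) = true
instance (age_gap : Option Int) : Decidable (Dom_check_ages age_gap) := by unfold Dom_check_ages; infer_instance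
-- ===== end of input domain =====

-- B replaces A's 100-iteration string-reversal scan by the closed form 9*(a-b) for two-digit reversal differences (simpler, direct construction).
set_option maxRecDepth 10000
set_option maxHeartbeats 1000000


-- ===== PORT A =====
-- loop body of A's while-loop (state = (diff_count, ages)); string '>' ported as '<' on .toList
-- (Python's code-point lexicographic order; Lean's String '<' instance is kernel-opaque)
def check_ages_body (age_gap : Option Int) (st : PySem.Dict Int Int × List String) (i : Int) :
    PySem.Dict Int Int × List String :=
  let age_orig := PySem.Str.zfill (PySem.Int.toStr i) 2
  -- step is the literal -1, never 0, so slice? is never none: getD "" is exact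
  let age_reverse := (PySem.Str.slice? age_orig none none (-1)).getD ""
  if age_orig ≠ age_reverse ∧ age_reverse.toList < age_orig.toList then
    -- age_reverse is two ASCII digits, so int() never raises: getD 0 is exact
    let j := (PySem.Int.ofStr? age_reverse).getD 0
    let diff := i - j
    if age_gap.getD 0 ≠ 0 then            -- Python truthiness of age_gap (None / 0 are falsy)
      if diff = age_gap.getD 0 then (st.1, st.2 ++ [age_reverse]) else st
    else
      if ¬ st.1.contains diff then (st.1.insert diff 1, st.2)
      else (st.1.modify diff 0 (· + 1), st.2)
  else st

def check_ages (age_gap : Option Int) : (List (Int × Int)) × List String :=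
  let st := (PySem.List.pyRange 0 100 1).foldl (check_ages_body age_gap) (PySem.Dict.empty, [])
  (st.1.items, st.2)

-- ===== PORT B =====
def check_ages_alt (age_gap : Option Int) : (List (Int × Int)) × List String :=
  let g := age_gap.getD 0                 -- Python truthiness of age_gap
  if g ≠ 0 then
    let ages :=
      if PySem.Int.mod g 9 = 0 ∧ 9 ≤ g ∧ g ≤ 81 then
        let m := PySem.Int.floordiv g 9
        (PySem.List.pyRange 0 (10 - m) 1).map
          (fun b => PySem.Int.toStr b ++ PySem.Int.toStr (b + m))
      else []
    ([], ages)
  else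
    ((PySem.List.pyRange 1 10 1).map (fun m => (9 * m, 10 - m)), [])

-- ===== PRECONDITION & SPEC =====
def Spec_check_ages (age_gap : Option Int) (out : (List (Int × Int)) × List String) : Prop := out = check_ages_alt age_gap
instance (age_gap : Option Int) (out : (List (Int × Int)) × List String) : Decidable (Spec_check_ages age_gap out) := by unfold Spec_check_ages; infer_instance

-- ===== CLAIM (what is proved, stated in full; the proofs are below) =====
def Claim_equal_check_ages : Prop := ∀ (age_gap : Option Int), Dom_check_ages age_gap → Spec_check_ages age_gap (check_ages age_gap)

-- ===== LEMMAS AND PROOFS =====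

-- the (diff, reversed-string) trace of A's loop: which i qualify and what they contribute
def traceStep (i : Int) : Option (Int × String) :=
  let age_orig := PySem.Str.zfill (PySem.Int.toStr i) 2
  let age_reverse := (PySem.Str.slice? age_orig none none (-1)).getD ""
  if age_orig ≠ age_reverse ∧ age_reverse.toList < age_orig.toList then
    some (i - (PySem.Int.ofStr? age_reverse).getD 0, age_reverse)
  else none

-- the trace of i = 0..99, computed once
def agePairs : List (Int × String) := [((9 : Int), "01"), ((18 : Int), "02"), ((9 : Int), "12"), ((27 : Int), "03"), ((18 : Int), "13"), ((9 : Int), "23"), ((36 : Int), "04"), ((27 : Int), "14"), ((18 : Int), "24"), ((9 : Int), "34"), ((45 : Int), "05"), ((36 : Int), "15"), ((27 : Int), "25"), ((18 : Int), "35"), ((9 : Int), "45"), ((54 : Int), "06"), ((45 : Int), "16"), ((36 : Int), "26"), ((27 : Int), "36"), ((18 : Int), "46"), ((9 : Int), "56"), ((63 : Int), "07"), ((54 : Int), "17"), ((45 : Int), "27"), ((36 : Int), "37"), ((27 : Int), "47"), ((18 : Int), "57"), ((9 : Int), "67"), ((72 : Int), "08"), ((63 : Int), "18"), ((54 : Int),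 "28"), ((45 : Int), "38"), ((36 : Int), "48"), ((27 : Int), "58"), ((18 : Int), "68"), ((9 : Int), "78"), ((81 : Int), "09"), ((72 : Int), "19"), ((63 : Int), "29"), ((54 : Int), "39"), ((45 : Int), "49"), ((36 : Int), "59"), ((27 : Int), "69"), ((18 : Int), "79"), ((9 : Int), "89")]

theorem trace_range : (PySem.List.pyRange 0 100 1).filterMap traceStep = agePairs := by decide

-- with a truthy age_gap, one loop step only consults the trace entry of i
theorem body_eq (g : Int) (hg : ¬ g = 0) (st : PySem.Dict Int Int × List String) (i : Int) :
    check_ages_body (some g) st i =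
      match traceStep i with
      | none => st
      | some p => if p.1 = g then (st.1, st.2 ++ [p.2]) else st := by
  simp only [check_ages_body, traceStep]
  by_cases hc : (PySem.Str.zfill (PySem.Int.toStr i) 2 ≠
        (PySem.Str.slice? (PySem.Str.zfill (PySem.Int.toStr i) 2) none none (-1)).getD "" ∧
      ((PySem.Str.slice? (PySem.Str.zfill (PySem.Int.toStr i) 2) none none (-1)).getD "").toList <
        (PySem.Str.zfill (PySem.Int.toStr i) 2).toList)
  · rw [if_pos hc, if_pos hc, if_pos (show (some g).getD 0 ≠ 0 from hg)]; rfl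
  · rw [if_neg hc, if_neg hc]

-- with a truthy age_gap, A's loop only ever appends the matching trace entries
theorem foldA_aux (g : Int) (hg : ¬ g = 0) (is : List Int)
    (d : PySem.Dict Int Int) (acc : List String) :
    is.foldl (check_ages_body (some g)) (d, acc) =
      (d, acc ++ ((is.filterMap traceStep).filter (fun p => p.1 = g)).map (·.2)) := by
  induction is generalizing acc with
  | nil => simp
  | cons i rest ih =>
    rw [List.foldl_cons, body_eq g hg, List.filterMap_cons]
    cases h : traceStep i with
    | none => simpa using ih acc
    | some p =>
      by_cases hp : p.1 = g
      · simp [hp, ih]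
      · simp [hp, ih]

theorem check_ages_truthy (g : Int) (hg : ¬ g = 0) :
    check_ages (some g) = ([], (agePairs.filter (fun p => p.1 = g)).map (·.2)) := by
  unfold check_ages
  rw [foldA_aux g hg, trace_range]
  simp [PySem.Dict.empty]

theorem check_ages_alt_truthy (g : Int) (hg : ¬ g = 0) :
    check_ages_alt (some g) =
      ([], if PySem.Int.mod g 9 = 0 ∧ 9 ≤ g ∧ g ≤ 81 then
        (PySem.List.pyRange 0 (10 - PySem.Int.floordiv g 9) 1).map
          (fun b => PySem.Int.toStr b ++ PySem.Int.toStr (b + PySem.Int.floordiv g 9))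
      else []) := by
  unfold check_ages_alt
  simp [hg]

theorem nine_dvd_cases (g : Int) (h : PySem.Int.mod g 9 = 0 ∧ 9 ≤ g ∧ g ≤ 81) :
    g = 9 ∨ g = 18 ∨ g = 27 ∨ g = 36 ∨ g = 45 ∨ g = 54 ∨ g = 63 ∨ g = 72 ∨ g = 81 := by
  obtain ⟨hm, h9, h81⟩ := h
  have hdvd : (9 : Int) ∣ g := (PySem.Int.mod_eq_zero_iff_dvd g 9).mp hm
  obtain ⟨k, rfl⟩ := hdvd
  omega

-- ===== VERDICT (by name: the statement is the Claim_ definition above) =====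
theorem check_ages_spec : Claim_equal_check_ages := by
  intro age_gap _
  unfold Spec_check_ages
  match age_gap with
  | none => decide
  | some g =>
    by_cases hg : g = 0
    · subst hg; decide
    · rw [check_ages_truthy g hg, check_ages_alt_truthy g hg]
      by_cases hcond : PySem.Int.mod g 9 = 0 ∧ 9 ≤ g ∧ g ≤ 81
      · rw [if_pos hcond]
        rcases nine_dvd_cases g hcond with rfl | rfl | rfl | rfl | rfl | rfl | rfl | rfl | rfl <;> decide
      · rw [if_neg hcond]
        have h9 : ¬ ((9:Int) = g) := fun e => hcond (e ▸ ⟨by decide, by decide, by decide⟩)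
        have h18 : ¬ ((18:Int) = g) := fun e => hcond (e ▸ ⟨by decide, by decide, by decide⟩)
        have h27 : ¬ ((27:Int) = g) := fun e => hcond (e ▸ ⟨by decide, by decide, by decide⟩)
        have h36 : ¬ ((36:Int) = g) := fun e => hcond (e ▸ ⟨by decide, by decide, by decide⟩)
        have h45 : ¬ ((45:Int) = g) := fun e => hcond (e ▸ ⟨by decide, by decide, by decide⟩)
        have h54 : ¬ ((54:Int) = g) := fun e => hcond (e ▸ ⟨by decide, by decide, by decide⟩)
        have h63 : ¬ ((63:Int) = g) := fun e => hcond (e ▸ ⟨by decide, by decide, by decide⟩)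
        have h72 : ¬ ((72:Int) = g) := fun e => hcond (e ▸ ⟨by decide, by decide, by decide⟩)
        have h81 : ¬ ((81:Int) = g) := fun e => hcond (e ▸ ⟨by decide, by decide, by decide⟩)
        simp [agePairs, h9, h18, h27, h36, h45, h54, h63, h72, h81]
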